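-- pv_equiv track=rewrite | github.com/luizanisio/Servico-OCR | app/app_controller.py | filtrar_dados
-- ===== SOURCE A (Python) =====
-- def filtrar_dados(dados, cabecalho, estampas, citacoes):
--     if cabecalho and estampas and citacoes:
--         return dados
--     res = []
--     for box in dados:
--         if box['tipo'] in {'C','R'} and not cabecalho:
--            continue
--         elif box['tipo'] in ('E','F') and not estampas:
--            continue
--         elif box['tipo'] == 'CT' and not citacoes:
--            continue
--         res.append(box)
--     return res
-- ===== SOURCE B (Python) =====
-- def filtrar_dados(dados, cabecalho, estampas, citacoes):
--     if cabecalho and estampas and citacoes: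
--         return dados
--     res = dados
--     if not cabecalho:
--         res = [box for box in res if box['tipo'] not in ('C', 'R')]
--     if not estampas:
--         res = [box for box in res if box['tipo'] not in ('E', 'F')]
--     if not citacoes:
--         res = [box for box in res if box['tipo'] != 'CT']
--     return res
-- ===== Notes on version B (the rewrite author's own statement) =====
-- stated objective: alternative
-- what changed: A's single pass with a per-box three-branch if/elif skip chain is replaced by up to three staged filter passes, each flag-controlled pass removing one category of boxes from the running list.
import Mathlib
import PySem

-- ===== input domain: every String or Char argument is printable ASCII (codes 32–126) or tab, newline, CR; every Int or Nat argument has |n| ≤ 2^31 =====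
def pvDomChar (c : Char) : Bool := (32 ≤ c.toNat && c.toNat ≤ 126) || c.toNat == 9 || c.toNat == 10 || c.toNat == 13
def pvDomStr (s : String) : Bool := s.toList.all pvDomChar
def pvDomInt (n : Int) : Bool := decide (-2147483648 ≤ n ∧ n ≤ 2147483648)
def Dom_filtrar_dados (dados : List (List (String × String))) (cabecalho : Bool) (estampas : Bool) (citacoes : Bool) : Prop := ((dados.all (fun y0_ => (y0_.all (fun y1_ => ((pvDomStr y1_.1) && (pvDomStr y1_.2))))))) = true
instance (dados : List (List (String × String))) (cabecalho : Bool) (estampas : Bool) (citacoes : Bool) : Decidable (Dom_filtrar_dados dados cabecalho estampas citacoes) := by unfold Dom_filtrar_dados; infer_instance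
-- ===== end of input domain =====

-- B replaces A's single-pass per-box three-branch if/elif skip chain with up to three
-- staged filter passes, each flag-controlled pass removing one category (objective: alternative).

-- ===== PORT A =====
-- box['tipo'] : first-match lookup in the association list (KeyError = none, excluded by Pre_)
def pvTipo (box : List (String × String)) : Option String :=
  (PySem.Dict.mk box).get? "tipo"

def filtrar_dados (dados : List (List (String × String))) (cabecalho : Bool) (estampas : Bool) (citacoes : Bool) : List (List (String × String)) :=
  if cabecalho && estampas && citacoes then dados
  else
    dados.foldl (fun res box =>
      match pvTipo box with
      | none => res  -- KeyError in Python; such inputs are outside Pre_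
      | some t =>
        if (t = "C" ∨ t = "R") ∧ cabecalho = false then res
        else if (t = "E" ∨ t = "F") ∧ estampas = false then res
        else if t = "CT" ∧ citacoes = false then res
        else res ++ [box]) []

-- ===== PORT B =====
def filtrar_dados_alt (dados : List (List (String × String))) (cabecalho : Bool) (estampas : Bool) (citacoes : Bool) : List (List (String × String)) :=
  if cabecalho && estampas && citacoes then dados
  else
    let res := dados
    let res := if !cabecalho then
        res.filter (fun box => match pvTipo box with
          | none => false  -- KeyError in Python; such inputs are outside Pre_
          | some t => !(t == "C" || t == "R"))
      else res
    let res := if !estampas then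
        res.filter (fun box => match pvTipo box with
          | none => false  -- KeyError in Python; such inputs are outside Pre_
          | some t => !(t == "E" || t == "F"))
      else res
    let res := if !citacoes then
        res.filter (fun box => match pvTipo box with
          | none => false  -- KeyError in Python; such inputs are outside Pre_
          | some t => !(t == "CT"))
      else res
    res

-- ===== PRECONDITION & SPEC =====
-- Pre_ excludes exactly the inputs on which Python A raises KeyError: some box lacks
-- the key 'tipo' while not all three flags are true (the early return avoids the loop).
def Pre_filtrar_dados (dados : List (List (String × String))) (cabecalho : Bool) (estampas : Bool) (citacoes : Bool) : Prop :=
  (cabecalho && estampas && citacoes) = true ∨ ∀ box ∈ dados, (pvTipo box).isSome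

instance (dados : List (List (String × String))) (cabecalho : Bool) (estampas : Bool) (citacoes : Bool) : Decidable (Pre_filtrar_dados dados cabecalho estampas citacoes) := by unfold Pre_filtrar_dados; infer_instance

def pvWitness_filtrar_dados : (List (List (String × String))) × Bool × Bool × Bool :=
  ([[("tipo", "C"), ("texto", "a")], [("tipo", "T")]], false, true, false)

def Spec_filtrar_dados (dados : List (List (String × String))) (cabecalho : Bool) (estampas : Bool) (citacoes : Bool) (out : List (List (String × String))) : Prop := out = filtrar_dados_alt dados cabecalho estampas citacoes
instance (dados : List (List (String × String))) (cabecalho : Bool) (estampas : Bool) (citacoes : Bool) (out : List (List (String × String))) : Decidable (Spec_filtrar_dados dados cabecalho estampas citacoes out) := by unfold Spec_filtrar_dados; infer_instance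

-- ===== CLAIM (what is proved, stated in full; the proofs are below) =====
def Claim_equal_filtrar_dados : Prop := ∀ (dados : List (List (String × String))) (cabecalho : Bool) (estampas : Bool) (citacoes : Bool), Dom_filtrar_dados dados cabecalho estampas citacoes → Pre_filtrar_dados dados cabecalho estampas citacoes → Spec_filtrar_dados dados cabecalho estampas citacoes (filtrar_dados dados cabecalho estampas citacoes)

-- ===== LEMMAS AND PROOFS =====

-- A's loop body is 'keep (append) iff the predicate holds': A's result is a filter.
theorem filtrar_dados_body_eq_filter (dados : List (List (String × String))) (cabecalho estampas citacoes : Bool) :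
    dados.foldl (fun res box =>
      match pvTipo box with
      | none => res
      | some t =>
        if (t = "C" ∨ t = "R") ∧ cabecalho = false then res
        else if (t = "E" ∨ t = "F") ∧ estampas = false then res
        else if t = "CT" ∧ citacoes = false then res
        else res ++ [box]) [] =
    dados.filter (fun box =>
      match pvTipo box with
      | none => false
      | some t =>
        decide (¬ (((t = "C" ∨ t = "R") ∧ cabecalho = false) ∨
                   ((t = "E" ∨ t = "F") ∧ estampas = false) ∨
                   (t = "CT" ∧ citacoes = false)))) := by
  induction dados using List.reverseRecOn with
  | nil => rfl
  | append_singleton xs box ih =>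
    rw [List.foldl_append, List.filter_append, ih, List.foldl_cons, List.foldl_nil,
        List.filter_cons, List.filter_nil]
    cases h : pvTipo box with
    | none => simp
    | some t => by_cases h1 : (t = "C" ∨ t = "R") ∧ cabecalho = false <;>
                by_cases h2 : (t = "E" ∨ t = "F") ∧ estampas = false <;>
                by_cases h3 : t = "CT" ∧ citacoes = false <;>
                simp [h1, h2, h3]

theorem filtrar_dados_spec : Claim_equal_filtrar_dados := by
  intro dados cab est cit _ hpre
  unfold Spec_filtrar_dados filtrar_dados filtrar_dados_alt
  by_cases hall : (cab && est && cit) = true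
  · simp [hall]
  · simp only [hall]
    rw [filtrar_dados_body_eq_filter]
    have hsome : ∀ box ∈ dados, (pvTipo box).isSome := by
      rcases hpre with h | h
      · exact absurd h hall
      · exact h
    cases cab <;> cases est <;> cases cit <;> simp_all [List.filter_filter] <;>
      · apply List.filter_congr
        intro box hmem
        have := hsome box hmem
        cases h : pvTipo box with
        | none => simp [h] at this
        | some t =>
          by_cases h1 : t = "C" <;> by_cases h2 : t = "R" <;> by_cases h3 : t = "E" <;>
            by_cases h4 : t = "F" <;> by_cases h5 : t = "CT" <;> simp_all
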